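-- pv_equiv track=rewrite | github.com/abhigyan-ach/AESEncryption | aes_m13438271/src/plaintext_convert.py | plaintext_to_state_matrix
-- ===== SOURCE A (Python) =====
-- def plaintext_to_state_matrix(plaintext):
--     """
--     Convert plaintext to a state matrix represented in hexadecimal form.
--     """
--     state_matrix = []
--     for i in range(4):  # Iterate over columns
--         column = []
--         for j in range(i, len(plaintext), 4):  # Iterate over each character in the column
--             ascii_value = ord(plaintext[j])
--             hex_value = format(ascii_value, '02x')
--             column.append(hex_value)
--         # If there are fewer than 4 bytes in the column, pad with '00'
--         while len(column) < 4:
--             column.append('00')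
--         state_matrix.append(column)
--     return state_matrix
-- ===== SOURCE B (Python) =====
-- def plaintext_to_state_matrix(plaintext):
--     """
--     Convert plaintext to a state matrix represented in hexadecimal form.
--     """
--     columns = [[], [], [], []]
--     for index, ch in enumerate(plaintext):
--         columns[index % 4].append(format(ord(ch), '02x'))
--     for column in columns:
--         while len(column) < 4:
--             column.append('00')
--     return columns
-- ===== Notes on version B (the rewrite author's own statement) =====
-- stated objective: alternative
-- what changed: Replaces A's four strided passes (one range(i, len, 4) scan per column) by a single sequential pass over enumerate(plaintext) that scatters each hex byte into columns[index % 4], then pads the four columns.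
import Mathlib
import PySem

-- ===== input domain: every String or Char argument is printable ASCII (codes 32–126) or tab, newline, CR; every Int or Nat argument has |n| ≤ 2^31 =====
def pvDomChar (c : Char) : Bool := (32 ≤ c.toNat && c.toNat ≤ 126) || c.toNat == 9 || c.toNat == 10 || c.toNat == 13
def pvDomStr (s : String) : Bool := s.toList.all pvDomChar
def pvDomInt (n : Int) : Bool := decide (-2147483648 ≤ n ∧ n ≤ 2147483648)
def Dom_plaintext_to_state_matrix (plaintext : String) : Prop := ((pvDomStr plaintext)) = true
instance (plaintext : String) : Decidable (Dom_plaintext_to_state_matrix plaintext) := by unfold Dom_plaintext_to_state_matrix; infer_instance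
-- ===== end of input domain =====

-- B replaces A's four strided passes over the string by one sequential scatter pass
-- (bucket index % 4) followed by padding; objective: alternative decomposition (same cost).

-- format(n, '02x') for 0 ≤ n < 256: two lowercase hex digits.  Exact on that range,
-- which covers every ord(c) the domain admits (codes ≤ 126).  Shared by both ports
-- (both Pythons call the same builtin `format(ord(c), '02x')`).
def hexDigit (n : Nat) : Char :=
  ['0','1','2','3','4','5','6','7','8','9','a','b','c','d','e','f'].getD n 'x'

def hexByte (n : Nat) : String := String.ofList [hexDigit (n / 16), hexDigit (n % 16)]

-- `while len(column) < 4: column.append('00')` — the literal while loop, shared verbatim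
-- by both Pythons.
def pad00 (col : List String) : List String :=
  if col.length < 4 then pad00 (col ++ ["00"]) else col
termination_by 4 - col.length
decreasing_by simp; omega

-- ===== PORT A =====
-- ord(c) is c.toNat (exact); format(·,'02x') is hexByte (exact on the domain, see above).
def plaintext_to_state_matrix (plaintext : String) : List (List String) :=
  (PySem.List.pyRange 0 4 1).foldl (fun state_matrix i =>
    let column := (PySem.List.pyRange i (PySem.Str.len plaintext) 4).foldl (fun column j =>
      column ++ [hexByte (((PySem.Str.pyGet? plaintext j).getD ' ').toNat)]) []
    state_matrix ++ [pad00 column]) []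

-- ===== PORT B =====
-- columns[index % 4].append(format(ord(ch), '02x')): the four columns are the 4-tuple state.
def scatterStep (st : List String × List String × List String × List String)
    (p : Int × Char) : List String × List String × List String × List String :=
  let h := hexByte p.2.toNat
  let m := PySem.Int.mod p.1 4
  if m = 0 then (st.1 ++ [h], st.2.1, st.2.2.1, st.2.2.2)
  else if m = 1 then (st.1, st.2.1 ++ [h], st.2.2.1, st.2.2.2)
  else if m = 2 then (st.1, st.2.1, st.2.2.1 ++ [h], st.2.2.2)
  else (st.1, st.2.1, st.2.2.1, st.2.2.2 ++ [h])

def plaintext_to_state_matrix_alt (plaintext : String) : List (List String) :=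
  let cols := (PySem.List.enumerate plaintext.toList 0).foldl scatterStep ([], [], [], [])
  [pad00 cols.1, pad00 cols.2.1, pad00 cols.2.2.1, pad00 cols.2.2.2]

-- ===== PRECONDITION & SPEC =====
def Spec_plaintext_to_state_matrix (plaintext : String) (out : List (List String)) : Prop := out = plaintext_to_state_matrix_alt plaintext
instance (plaintext : String) (out : List (List String)) : Decidable (Spec_plaintext_to_state_matrix plaintext out) := by unfold Spec_plaintext_to_state_matrix; infer_instance

-- ===== CLAIM (what is proved, stated in full; the proofs are below) =====
def Claim_equal_plaintext_to_state_matrix : Prop := ∀ (plaintext : String), Dom_plaintext_to_state_matrix plaintext → Spec_plaintext_to_state_matrix plaintext (plaintext_to_state_matrix plaintext)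

-- ===== LEMMAS AND PROOFS =====

-- the hex strings of the entries of ps whose index is ≡ k (mod 4)
def selHex (k : Int) (ps : List (Int × Char)) : List String :=
  (ps.filter (fun p => PySem.Int.mod p.1 4 = k)).map (fun p => hexByte p.2.toNat)

-- the hex strings of the entries caught by scatterStep's final else branch
def selRest (ps : List (Int × Char)) : List String :=
  (ps.filter (fun p =>
    ¬ PySem.Int.mod p.1 4 = 0 ∧ ¬ PySem.Int.mod p.1 4 = 1 ∧ ¬ PySem.Int.mod p.1 4 = 2)).map
    (fun p => hexByte p.2.toNat)

lemma scatter_eq (ps : List (Int × Char)) :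
    ∀ a b c d, ps.foldl scatterStep (a, b, c, d) =
      (a ++ selHex 0 ps, b ++ selHex 1 ps, c ++ selHex 2 ps, d ++ selRest ps) := by
  induction ps with
  | nil => intro a b c d; simp [selHex, selRest]
  | cons p ps ih =>
    intro a b c d
    have e : PySem.Int.mod p.1 4 = p.1 % 4 :=
      PySem.Int.mod_eq_emod_of_pos (show (0:Int) < 4 by norm_num)
    have hsel : ∀ k : Int, selHex k (p :: ps) =
        (if p.1 % 4 = k then [hexByte p.2.toNat] else []) ++ selHex k ps := by
      intro k; unfold selHex; rw [List.filter_cons]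
      by_cases h : p.1 % 4 = k <;> simp [h]
    have hrest : selRest (p :: ps) =
        (if p.1 % 4 = 0 ∨ p.1 % 4 = 1 ∨ p.1 % 4 = 2 then [] else [hexByte p.2.toNat]) ++ selRest ps := by
      unfold selRest; rw [List.filter_cons]
      by_cases h : p.1 % 4 = 0 ∨ p.1 % 4 = 1 ∨ p.1 % 4 = 2
      · rcases h with h | h | h <;> simp [h]
      · have h0 := h; push Not at h0; simp [h0.1, h0.2.1, h0.2.2]
    rw [List.foldl_cons, hsel 0, hsel 1, hsel 2, hrest]
    by_cases h0 : p.1 % 4 = 0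
    · have hstep : scatterStep (a, b, c, d) p = (a ++ [hexByte p.2.toNat], b, c, d) := by
        unfold scatterStep; rw [e, if_pos h0]
      rw [hstep, ih]; simp [h0]
    · by_cases h1 : p.1 % 4 = 1
      · have hstep : scatterStep (a, b, c, d) p = (a, b ++ [hexByte p.2.toNat], c, d) := by
          unfold scatterStep; rw [e, if_neg h0, if_pos h1]
        rw [hstep, ih]; simp [h1]
      · by_cases h2 : p.1 % 4 = 2
        · have hstep : scatterStep (a, b, c, d) p = (a, b, c ++ [hexByte p.2.toNat], d) := by
            unfold scatterStep; rw [e, if_neg h0, if_neg h1, if_pos h2]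
          rw [hstep, ih]; simp [h2]
        · have hstep : scatterStep (a, b, c, d) p = (a, b, c, d ++ [hexByte p.2.toNat]) := by
            unfold scatterStep; rw [e, if_neg h0, if_neg h1, if_neg h2]
          rw [hstep, ih]; simp [h0, h1, h2]

lemma selRest_eq_selHex3 (cs : List Char) :
    selRest (PySem.List.enumerate cs 0) = selHex 3 (PySem.List.enumerate cs 0) := by
  unfold selRest selHex
  congr 1
  apply List.filter_congr
  intro p hp
  obtain ⟨k, hk, rfl⟩ := (PySem.List.mem_enumerate_iff _ _ _).mp hp
  have e : PySem.Int.mod ((0:Int) + (k:Int)) 4 = ((0:Int) + (k:Int)) % 4 :=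
    PySem.Int.mod_eq_emod_of_pos (show (0:Int) < 4 by norm_num)
  simp only [e, decide_eq_decide]
  omega

lemma range4_succ (k : Int) (n : Nat) (hk0 : 0 ≤ k) (hk : k < 4) :
    PySem.List.pyRange k ((n:Int) + 1) 4 =
      PySem.List.pyRange k (n:Int) 4 ++ (if (n:Int) % 4 = k then [(n:Int)] else []) := by
  rw [PySem.List.pyRange_of_pos _ _ (by norm_num), PySem.List.pyRange_of_pos _ _ (by norm_num)]
  by_cases h : (n:Int) % 4 = k
  · have hm : (if k < (n:Int) + 1 then (((n:Int) + 1 - k + 4 - 1) / 4).toNat else 0)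
        = (if k < (n:Int) then (((n:Int) - k + 4 - 1) / 4).toNat else 0) + 1 := by
      split_ifs <;> omega
    rw [hm, List.range_succ, List.map_append, if_pos h]
    congr 1
    simp only [List.map_cons, List.map_nil, List.cons.injEq, and_true]
    split_ifs at * <;> omega
  · have hm : (if k < (n:Int) + 1 then (((n:Int) + 1 - k + 4 - 1) / 4).toNat else 0)
        = (if k < (n:Int) then (((n:Int) - k + 4 - 1) / 4).toNat else 0) := by
      split_ifs <;> omega
    rw [hm, if_neg h, List.append_nil]

lemma core (k : Int) (hk0 : 0 ≤ k) (hk : k < 4) (cs : List Char) :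
    (PySem.List.pyRange k (cs.length : Int) 4).map
        (fun j => hexByte (((PySem.List.pyGet? cs j).getD ' ').toNat))
      = selHex k (PySem.List.enumerate cs 0) := by
  induction cs using List.reverseRecOn with
  | nil => simp [selHex, PySem.List.pyRange_of_pos _ _ (show (0:Int) < 4 by norm_num),
      not_lt.mpr hk0, PySem.List.enumerate]
  | append_singleton cs c ih =>
    have hn : ((cs ++ [c]).length : Int) = (cs.length : Int) + 1 := by simp
    rw [hn, range4_succ k cs.length hk0 hk, List.map_append]
    have hold : (PySem.List.pyRange k (cs.length : Int) 4).map
        (fun j => hexByte (((PySem.List.pyGet? (cs ++ [c]) j).getD ' ').toNat))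
        = (PySem.List.pyRange k (cs.length : Int) 4).map
        (fun j => hexByte (((PySem.List.pyGet? cs j).getD ' ').toNat)) := by
      apply List.map_congr_left
      intro j hj
      obtain ⟨hj1, hj2, -⟩ :=
        ((PySem.List.mem_pyRange_iff_of_pos (show (0:Int) < 4 by norm_num) j).mp hj)
      have h0j : 0 ≤ j := le_trans hk0 hj1
      rw [PySem.List.pyGet?_of_nonneg _ h0j, PySem.List.pyGet?_of_nonneg _ h0j,
        List.getElem?_append_left (by omega)]
    rw [hold, ih]
    rw [PySem.List.enumerate_append]
    unfold selHex
    rw [List.filter_append, List.map_append]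
    congr 1
    simp only [PySem.List.enumerate, List.filter]
    by_cases h : (cs.length : Int) % 4 = k
    · simp [h]
    · simp [h]

-- ===== VERDICT (by name: the statement is the Claim_ definition above) =====
theorem plaintext_to_state_matrix_spec : Claim_equal_plaintext_to_state_matrix := by
  intro s _
  unfold Spec_plaintext_to_state_matrix plaintext_to_state_matrix plaintext_to_state_matrix_alt
  have hr : PySem.List.pyRange 0 4 1 = [0, 1, 2, 3] := by decide
  rw [hr]
  simp only [List.foldl_cons, List.foldl_nil, List.nil_append, scatter_eq,
    PySem.List.foldl_append_singleton_eq_map, PySem.Str.len_eq, PySem.Str.pyGet?,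
    PySem.Chars.pyGet?_eq_listPyGet?, selRest_eq_selHex3,
    List.cons_append]
  rw [← core 0 (by norm_num) (by norm_num), ← core 1 (by norm_num) (by norm_num),
      ← core 2 (by norm_num) (by norm_num), ← core 3 (by norm_num) (by norm_num)]
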